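-- pv_equiv track=rewrite | github.com/katarzynaadamczyk/AoC | 2021/Day_15/task1_4.py | checkony
-- ===== SOURCE A (Python) =====
-- def checkony(data, result, x, y):
--     if x < len(data[y]) - 1:
--         tmp = []
--         for i in range(max(0, y - 8), y):
--             act = result[i][x] + data[i][x+1]
--             for j in range(i + 1, y+1):
--                 act += data[j][x+1]
--             tmp.append(act)
--         return (min(tmp)) if len(tmp) > 0 else -1
--     else:
--         return -1
-- ===== SOURCE B (Python) =====
-- def checkony(data, result, x, y):
--     if x >= len(data[y]) - 1:
--         return -1
--     lo = max(0, y - 8)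
--     if lo >= y:
--         return -1
--     running = data[y][x + 1]
--     best = None
--     for i in range(y - 1, lo - 1, -1):
--         running += data[i][x + 1]
--         cand = result[i][x] + running
--         if best is None or cand < best:
--             best = cand
--     return best
-- ===== Notes on version B (the rewrite author's own statement) =====
-- stated objective: alternative
-- what changed: Replaces the quadratic inner re-summation over the window with a single reverse pass that maintains a running suffix sum of data[j][x+1] and tracks the minimum candidate directly, instead of building the tmp list and calling min.
import Mathlib
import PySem

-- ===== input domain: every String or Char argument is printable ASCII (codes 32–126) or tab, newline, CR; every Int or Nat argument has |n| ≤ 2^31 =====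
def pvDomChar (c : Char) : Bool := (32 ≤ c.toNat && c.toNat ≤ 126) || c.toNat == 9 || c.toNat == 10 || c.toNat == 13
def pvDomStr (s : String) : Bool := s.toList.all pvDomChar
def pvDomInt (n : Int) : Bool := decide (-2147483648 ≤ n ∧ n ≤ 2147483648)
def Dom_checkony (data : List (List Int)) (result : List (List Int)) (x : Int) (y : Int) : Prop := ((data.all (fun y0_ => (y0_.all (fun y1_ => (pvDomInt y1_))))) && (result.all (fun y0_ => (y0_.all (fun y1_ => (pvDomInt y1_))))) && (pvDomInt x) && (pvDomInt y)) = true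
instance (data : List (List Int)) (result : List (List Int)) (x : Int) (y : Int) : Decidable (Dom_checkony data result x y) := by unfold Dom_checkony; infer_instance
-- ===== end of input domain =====

-- B replaces the quadratic inner re-summation over the 8-row window with a single reverse
-- pass keeping a running suffix sum and tracking the minimum directly (no tmp list, no min call).

-- ===== PORT A =====
def checkony (data : List (List Int)) (result : List (List Int)) (x : Int) (y : Int) : Int :=
  if x < ((PySem.List.pyGetD data y []).length : Int) - 1 then
    let tmp := (PySem.List.pyRange (max 0 (y - 8)) y 1).foldl (fun tmp i =>
      tmp ++ [ (PySem.List.pyRange (i + 1) (y + 1) 1).foldl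
                 (fun act j => act + PySem.List.pyGetD (PySem.List.pyGetD data j []) (x + 1) 0)
                 (PySem.List.pyGetD (PySem.List.pyGetD result i []) x 0
                   + PySem.List.pyGetD (PySem.List.pyGetD data i []) (x + 1) 0) ]) ([] : List Int)
    if tmp.length > 0 then (PySem.List.min? tmp (fun v => v)).getD 0 else -1
  else -1

-- ===== PORT B =====
def checkony_alt (data : List (List Int)) (result : List (List Int)) (x : Int) (y : Int) : Int :=
  if ((PySem.List.pyGetD data y []).length : Int) - 1 ≤ x then -1
  else
    let lo := max 0 (y - 8)
    if y ≤ lo then -1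
    else
      let st := (PySem.List.pyRange (y - 1) (lo - 1) (-1)).foldl
        (fun (st : Int × Option Int) i =>
          let run := st.1 + PySem.List.pyGetD (PySem.List.pyGetD data i []) (x + 1) 0
          let cand := PySem.List.pyGetD (PySem.List.pyGetD result i []) x 0 + run
          (run, match st.2 with
                | none => some cand
                | some b => if cand < b then some cand else some b))
        (PySem.List.pyGetD (PySem.List.pyGetD data y []) (x + 1) 0, (none : Option Int))
      st.2.getD (-1)

-- ===== PRECONDITION & SPEC =====
-- Pre_ excludes exactly the inputs on which A raises IndexError: row y of data must exist,
-- and when A's loop runs, every index it touches must be in range (Python negative-index rule).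
def Pre_checkony (data : List (List Int)) (result : List (List Int)) (x : Int) (y : Int) : Prop :=
  PySem.Raise.InRange data.length y ∧
  (x < ((PySem.List.pyGetD data y []).length : Int) - 1 →
    (∀ i ∈ PySem.List.pyRange (max 0 (y - 8)) y 1,
      PySem.Raise.InRange result.length i ∧
      PySem.Raise.InRange (PySem.List.pyGetD result i []).length x ∧
      PySem.Raise.InRange data.length i ∧
      PySem.Raise.InRange (PySem.List.pyGetD data i []).length (x + 1)) ∧
    (0 < y → PySem.Raise.InRange (PySem.List.pyGetD data y []).length (x + 1)))
instance (data : List (List Int)) (result : List (List Int)) (x : Int) (y : Int) : Decidable (Pre_checkony data result x y) := by unfold Pre_checkony; infer_instance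

def pvWitness_checkony : List (List Int) × List (List Int) × Int × Int :=
  ([[1, 2], [3, 4]], [[5, 6], [7, 8]], 0, 1)

def Spec_checkony (data : List (List Int)) (result : List (List Int)) (x : Int) (y : Int) (out : Int) : Prop := out = checkony_alt data result x y
instance (data : List (List Int)) (result : List (List Int)) (x : Int) (y : Int) (out : Int) : Decidable (Spec_checkony data result x y out) := by unfold Spec_checkony; infer_instance

-- ===== CLAIM (what is proved, stated in full; the proofs are below) =====
def Claim_equal_checkony : Prop := ∀ (data : List (List Int)) (result : List (List Int)) (x : Int) (y : Int), Dom_checkony data result x y → Pre_checkony data result x y → Spec_checkony data result x y (checkony data result x y)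

-- ===== LEMMAS AND PROOFS =====

-- suffix sum of f over j = a .. y  (what B's running accumulator holds)
def pvSfx (f : Int → Int) (y a : Int) : Int := ((PySem.List.pyRange a (y + 1) 1).map f).sum
-- the candidate A computes for window row i
def pvCnd (f g : Int → Int) (y i : Int) : Int := g i + pvSfx f y i
-- running minimum of the candidates over i = a .. y-1
def pvMn (f g : Int → Int) (y a : Int) : Int :=
  ((PySem.List.pyRange (a + 1) y 1).map (pvCnd f g y)).foldl min (pvCnd f g y a)

theorem pvSfx_cons (f : Int → Int) {y a : Int} (h : a ≤ y) :
    pvSfx f y a = f a + pvSfx f y (a + 1) := by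
  unfold pvSfx
  rw [PySem.List.pyRange_one_cons (by omega)]
  simp

theorem pvMn_rec (f g : Int → Int) {y a : Int} (h : a + 1 < y) :
    pvMn f g y a = min (pvCnd f g y a) (pvMn f g y (a + 1)) := by
  unfold pvMn
  rw [PySem.List.pyRange_one_cons (by omega), List.map_cons, List.foldl_cons,
    List.foldl_assoc]

-- A's loop builds exactly the list of candidates
theorem pvTmpA (f g : Int → Int) (lo y : Int) :
    (PySem.List.pyRange lo y 1).foldl (fun tmp i =>
      tmp ++ [ (PySem.List.pyRange (i + 1) (y + 1) 1).foldl (fun act j => act + f j) (g i + f i) ])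
      ([] : List Int)
    = (PySem.List.pyRange lo y 1).map (pvCnd f g y) := by
  rw [PySem.List.foldl_append_singleton_eq_map]
  simp only [List.nil_append]
  refine List.map_congr_left (fun i hi => ?_)
  rw [PySem.List.mem_pyRange_one] at hi
  rw [PySem.List.foldl_add]
  rw [pvCnd, pvSfx_cons f (by omega)]
  unfold pvSfx
  ring

-- B's loop, in foldr form over the ascending range
theorem pvLoopB (f g : Int → Int) : ∀ (n : Nat) (a y : Int), a + (n : Int) + 1 = y →
    (PySem.List.pyRange a y 1).foldr
      (fun i (st : Int × Option Int) =>
        let run := st.1 + f i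
        let cand := g i + run
        (run, match st.2 with
              | none => some cand
              | some b => if cand < b then some cand else some b))
      (f y, (none : Option Int))
    = (pvSfx f y a, some (pvMn f g y a)) := by
  intro n
  induction n with
  | zero =>
    intro a y h
    rw [show y = a + 1 by omega]
    rw [PySem.List.pyRange_one_singleton]
    simp only [List.foldr_cons, List.foldr_nil]
    have hs : pvSfx f (a + 1) a = f (a + 1) + f a := by
      rw [pvSfx_cons f (by omega), pvSfx_cons f (by omega)]
      unfold pvSfx
      rw [PySem.List.pyRange_one_eq_nil (by omega)]
      simp; ring
    have hm : pvMn f g (a + 1) a = g a + (f (a + 1) + f a) := by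
      unfold pvMn
      rw [PySem.List.pyRange_one_eq_nil (by omega)]
      simp only [List.map_nil, List.foldl_nil]
      rw [pvCnd, hs]
    rw [hs, hm]
  | succ n ih =>
    intro a y h
    rw [PySem.List.pyRange_one_cons (by omega), List.foldr_cons,
      ih (a + 1) y (by omega)]
    simp only
    have hc : pvCnd f g y a = g a + (pvSfx f y (a + 1) + f a) := by
      rw [pvCnd, pvSfx_cons f (by omega)]; ring
    rw [Prod.mk.injEq]
    refine ⟨by rw [pvSfx_cons f (show a ≤ y by omega)]; ring, ?_⟩
    rw [pvMn_rec f g (show a + 1 < y by omega), ← hc]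
    by_cases h1 : pvCnd f g y a < pvMn f g y (a + 1)
    · rw [if_pos h1, min_eq_left (le_of_lt h1)]
    · rw [if_neg h1, min_eq_right (by omega)]

-- the Python min of the candidate list
theorem pvMinA (f g : Int → Int) (lo y : Int) (hwin : lo < y) :
    PySem.List.min? ((PySem.List.pyRange lo y 1).map (pvCnd f g y)) (fun v => v)
    = some (pvMn f g y lo) := by
  rw [PySem.List.pyRange_one_cons hwin, List.map_cons, PySem.List.min?_id_cons, pvMn]

-- ===== VERDICT (by name: the statement is the Claim_ definition above) =====
theorem checkony_spec : Claim_equal_checkony := by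
  intro data result x y _ _
  unfold Spec_checkony checkony checkony_alt
  by_cases hguard : x < ((PySem.List.pyGetD data y []).length : Int) - 1
  · rw [if_pos hguard,
      if_neg (show ¬(((PySem.List.pyGetD data y []).length : Int) - 1 ≤ x) by omega)]
    set lo : Int := max 0 (y - 8) with hlo
    by_cases hwin : y ≤ lo
    · rw [if_pos hwin]
      have hnil : PySem.List.pyRange lo y 1 = [] := PySem.List.pyRange_one_eq_nil hwin
      simp [hnil]
    · rw [if_neg hwin]
      rw [not_le] at hwin
      have hA := pvTmpA (fun i => PySem.List.pyGetD (PySem.List.pyGetD data i []) (x + 1) 0)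
        (fun i => PySem.List.pyGetD (PySem.List.pyGetD result i []) x 0) lo y
      simp only at hA
      rw [hA]
      rw [if_pos (by rw [List.length_map, PySem.List.length_pyRange_one]; omega)]
      rw [pvMinA _ _ lo y hwin]
      have hrev : PySem.List.pyRange (y - 1) (lo - 1) (-1) = (PySem.List.pyRange lo y 1).reverse := by
        rw [PySem.List.pyRange_neg_one_eq_reverse]
        norm_num
      rw [hrev, List.foldl_reverse]
      have hB := pvLoopB (fun i => PySem.List.pyGetD (PySem.List.pyGetD data i []) (x + 1) 0)
        (fun i => PySem.List.pyGetD (PySem.List.pyGetD result i []) x 0)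
        (y - lo - 1).toNat lo y (by omega)
      simp only at hB
      rw [hB]
      simp
  · rw [if_neg hguard,
      if_pos (show ((PySem.List.pyGetD data y []).length : Int) - 1 ≤ x by omega)]
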